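-- pv_equiv track=rewrite | github.com/UnEthicalMK/rabin-karp-document-fingerprinting | main.py | generate_rabin_karp_hashes
-- ===== SOURCE A (Python) =====
-- def generate_rabin_karp_hashes(normalized_text:str,k:int=12):
--
--     """
--     Moves a window of size k over the text to compute hash values for
--     each substring. Applies the Rabin–Karp rolling hash to reuse previous
--     results, reducing time complexity from O(N·k) to O(N).
--     """
--
--     n=len(normalized_text)
--     if n<k:
--         return []
--
--     #Constants for polynomial string hashing
--     base=256
--     modulus=10**9+7          #Large Prime No. to prevent integer overflow
--     hashes=[]
--     current_hash=0
--
--     highest_power=pow(base,k-1,modulus)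
--
--     #Calculate the hash for the very first K-gram window
--     for i in range(k):
--         char_value=ord(normalized_text[i])
--         current_hash=(current_hash * base + char_value)%modulus
--     hashes.append(current_hash)
--
--     #Slide the window and use the Rolling Hash formula for O(1) transitions
--     for i in range(1,n-k+1):
--         char_out=ord(normalized_text[i-1])
--         char_in=ord(normalized_text[i+k-1])
--
--         #Step 1: Remove outgoing character
--         current_hash=(current_hash - char_out * highest_power)%modulus
--
--         #Step 2: Shift base and add incoming character
--         current_hash=(current_hash * base + char_in)%modulus
--
--         #Ensure hash remains positive in Python
--         current_hash=(current_hash + modulus)%modulus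
--         hashes.append(current_hash)
--
--     return hashes
-- ===== SOURCE B (Python) =====
-- def generate_rabin_karp_hashes(normalized_text: str, k: int = 12):
--     # Direct per-window Horner hash: recompute each k-gram hash from scratch.
--     n = len(normalized_text)
--     if n < k:
--         return []
--     base = 256
--     modulus = 10**9 + 7
--     hashes = []
--     for i in range(n - k + 1):
--         h = 0
--         for j in range(k):
--             h = (h * base + ord(normalized_text[i + j])) % modulus
--         hashes.append(h)
--     return hashes
-- ===== Notes on version B (the rewrite author's own statement) =====
-- stated objective: simpler
-- what changed: Replaces the maintained rolling-hash state (precomputed highest power, subtract-outgoing/add-incoming update) with a plain nested loop that recomputes each window's hash directly by Horner's method.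
import Mathlib
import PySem

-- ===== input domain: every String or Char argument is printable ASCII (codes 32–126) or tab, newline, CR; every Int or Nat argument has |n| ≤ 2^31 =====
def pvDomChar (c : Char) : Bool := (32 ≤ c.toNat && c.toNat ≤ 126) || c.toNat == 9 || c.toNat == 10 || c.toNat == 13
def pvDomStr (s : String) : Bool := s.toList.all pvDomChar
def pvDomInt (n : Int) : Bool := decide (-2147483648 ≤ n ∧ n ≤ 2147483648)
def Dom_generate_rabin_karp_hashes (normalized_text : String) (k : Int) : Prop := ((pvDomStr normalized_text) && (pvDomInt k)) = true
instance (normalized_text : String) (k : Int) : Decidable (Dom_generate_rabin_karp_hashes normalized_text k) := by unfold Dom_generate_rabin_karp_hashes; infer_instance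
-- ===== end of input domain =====

-- B replaces A's rolling-hash update with a direct per-window Horner recomputation (simpler; not faster).


-- ===== PORT A =====
-- ord(normalized_text[i]): value of the character at (possibly negative) index i; the getD 0
-- default is reached only where Python raises IndexError, which happens only outside Pre_.
def pvOrdAt (s : String) (i : Int) : Int :=
  ((PySem.Str.pyGet? s i).map (fun c => (c.toNat : Int))).getD 0

def generate_rabin_karp_hashes (normalized_text : String) (k : Int) : List Int :=
  let n : Int := PySem.Str.len normalized_text
  if n < k then []
  else
    let base : Int := 256
    let modulus : Int := 10 ^ 9 + 7
    -- pow(base, k-1, modulus): PySem.Int.powMod for k ≥ 1; for k = 0 Python's pow computes the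
    -- modular inverse of base, hand-ported via the extended gcd (exact there); for k ≤ -1 the
    -- slide loop below raises IndexError in Python (outside Pre_), so the value is never claimed.
    let highest_power : Int :=
      if 1 ≤ k then PySem.Int.powMod base (k - 1).toNat modulus
      else (Nat.gcdA 256 1000000007) % modulus
    let current_hash : Int :=
      (PySem.List.pyRange 0 k 1).foldl
        (fun h i => PySem.Int.mod (h * base + pvOrdAt normalized_text i) modulus) 0
    let st : Int × List Int :=
      (PySem.List.pyRange 1 (n - k + 1) 1).foldl
        (fun (st : Int × List Int) i =>
          let char_out := pvOrdAt normalized_text (i - 1)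
          let char_in := pvOrdAt normalized_text (i + k - 1)
          let h1 := PySem.Int.mod (st.1 - char_out * highest_power) modulus
          let h2 := PySem.Int.mod (h1 * base + char_in) modulus
          let h3 := PySem.Int.mod (h2 + modulus) modulus
          (h3, st.2 ++ [h3]))
        (current_hash, [current_hash])
    st.2

-- ===== PORT B =====
def generate_rabin_karp_hashes_alt (normalized_text : String) (k : Int) : List Int :=
  let n : Int := PySem.Str.len normalized_text
  if n < k then []
  else
    (PySem.List.pyRange 0 (n - k + 1) 1).map (fun i =>
      (PySem.List.pyRange 0 k 1).foldl
        (fun h j => PySem.Int.mod (h * 256 + pvOrdAt normalized_text (i + j)) (10 ^ 9 + 7)) 0)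

-- ===== PRECONDITION & SPEC =====
-- Pre_ excludes exactly k ≤ -1, where A's slide loop always indexes past the end of the text
-- and raises IndexError (A returns no value there).
def Pre_generate_rabin_karp_hashes (normalized_text : String) (k : Int) : Prop := 0 ≤ k
instance (normalized_text : String) (k : Int) : Decidable (Pre_generate_rabin_karp_hashes normalized_text k) := by unfold Pre_generate_rabin_karp_hashes; infer_instance

def pvWitness_generate_rabin_karp_hashes : String × Int := ("abcd", 2)

def Spec_generate_rabin_karp_hashes (normalized_text : String) (k : Int) (out : List Int) : Prop := out = generate_rabin_karp_hashes_alt normalized_text k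
instance (normalized_text : String) (k : Int) (out : List Int) : Decidable (Spec_generate_rabin_karp_hashes normalized_text k out) := by unfold Spec_generate_rabin_karp_hashes; infer_instance

-- ===== CLAIM (what is proved, stated in full; the proofs are below) =====
def Claim_equal_generate_rabin_karp_hashes : Prop := ∀ (normalized_text : String) (k : Int), Dom_generate_rabin_karp_hashes normalized_text k → Pre_generate_rabin_karp_hashes normalized_text k → Spec_generate_rabin_karp_hashes normalized_text k (generate_rabin_karp_hashes normalized_text k)

-- ===== LEMMAS AND PROOFS =====

-- character value at Nat index j (0 outside the text; both ports only use in-range indices under Pre_)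
def pvC (s : String) (j : Nat) : Int := ((s.toList[j]?).map (fun c => (c.toNat : Int))).getD 0

-- exact (unreduced) Horner polynomial of the window of length t starting at i
def pvS (s : String) (i : Nat) : Nat → Int
  | 0 => 0
  | t + 1 => pvS s i t * 256 + pvC s (i + t)

-- its reduction mod 10^9+7: the hash of that window
def pvW (s : String) (i t : Nat) : Int := pvS s i t % 1000000007

theorem pvOrdAt_natCast (s : String) (j : Nat) : pvOrdAt s (j : Int) = pvC s j := by
  simp [pvOrdAt, pvC]

theorem pvS_front (s : String) (i t : Nat) :
    pvS s i (t + 1) = pvC s i * 256 ^ t + pvS s (i + 1) t := by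
  induction t with
  | zero => simp [pvS]
  | succ t ih =>
    have : pvS s i (t + 1 + 1) = pvS s i (t + 1) * 256 + pvC s (i + (t + 1)) := rfl
    rw [this, ih]
    have : pvS s (i + 1) (t + 1) = pvS s (i + 1) t * 256 + pvC s (i + 1 + t) := rfl
    rw [this]
    have hidx : i + (t + 1) = i + 1 + t := by omega
    rw [hidx]; ring

theorem pv_mod_step (a b : Int) :
    (a % 1000000007 * 256 + b) % 1000000007 = (a * 256 + b) % 1000000007 := by
  conv_lhs => rw [Int.add_emod, Int.mul_emod, Int.emod_emod_of_dvd _ dvd_rfl]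
  conv_rhs => rw [Int.add_emod, Int.mul_emod]

-- B's inner Horner fold computes the window hash
theorem pv_horner_fold (s : String) (i : Nat) : ∀ t : Nat,
    (List.range t).foldl (fun h j => (h * 256 + pvC s (i + j)) % 1000000007) 0 = pvW s i t := by
  intro t
  induction t with
  | zero => simp [pvW, pvS]
  | succ t ih =>
    rw [List.range_succ, List.foldl_append, ih]
    show (pvW s i t * 256 + pvC s (i + t)) % 1000000007 = pvW s i (t + 1)
    rw [pvW, pvW, pv_mod_step]
    rfl

-- Python's '%' with this positive modulus is Int.emod
theorem pv_mod_eq (a : Int) : PySem.Int.mod a ((10:Int) ^ 9 + 7) = a % 1000000007 := by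
  rw [PySem.Int.mod_eq_emod_of_pos (by norm_num)]; norm_num

theorem pv_plusM (x : Int) : (x % 1000000007 + 1000000007) % 1000000007 = x % 1000000007 := by
  rw [Int.add_emod_right, Int.emod_emod_of_dvd _ dvd_rfl]

-- the rolling update of A, applied to the hash of window p, yields the hash of window p+1 (k ≥ 1 case)
theorem pv_roll_step (s : String) (p K : Nat) (hK : 1 ≤ K) :
    ((((pvW s p K - pvC s p * (256 ^ (K - 1) % 1000000007)) % 1000000007) * 256 + pvC s (p + K))
        % 1000000007 + 1000000007) % 1000000007 = pvW s (p + 1) K := by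
  obtain ⟨K', rfl⟩ : ∃ K', K = K' + 1 := ⟨K - 1, by omega⟩
  simp only [Nat.add_sub_cancel]
  rw [pv_plusM, pvW, pvW]
  have h1 : (pvS s p (K' + 1) % 1000000007 - pvC s p * (256 ^ K' % 1000000007)) % 1000000007
      = (pvS s p (K' + 1) - pvC s p * 256 ^ K') % 1000000007 := by
    conv_lhs => rw [Int.sub_emod, Int.mul_emod (pvC s p) (256 ^ K' % 1000000007),
      Int.emod_emod_of_dvd _ dvd_rfl]
    conv_rhs => rw [Int.sub_emod, Int.mul_emod (pvC s p) (256 ^ K')]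
    rw [Int.emod_emod_of_dvd ((256:Int) ^ K') dvd_rfl]
  rw [h1, pv_mod_step]
  congr 1
  rw [pvS_front]
  have h2 : pvS s (p + 1) (K' + 1) = pvS s (p + 1) K' * 256 + pvC s (p + 1 + K') := rfl
  rw [h2]
  have hidx : p + (K' + 1) = p + 1 + K' := by omega
  rw [hidx]; ring

-- the k = 0 rolling step: the modular inverse of 256 makes the hash stay 0
theorem pv_roll_step_zero (s : String) (p : Nat) :
    (((0 - pvC s p * ((Nat.gcdA 256 1000000007) % 1000000007)) % 1000000007 * 256 + pvC s p)
        % 1000000007 + 1000000007) % 1000000007 = 0 := by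
  have hg : (256 * ((Nat.gcdA 256 1000000007) % 1000000007)) % 1000000007 = 1 := by decide
  set g : Int := (Nat.gcdA 256 1000000007) % 1000000007 with hgdef
  rw [pv_plusM, pv_mod_step]
  have h1 : (0 - pvC s p * g) * 256 + pvC s p = pvC s p - pvC s p * (256 * g) := by ring
  rw [h1]
  have h2 : (pvC s p - pvC s p * (256 * g)) % 1000000007
      = (pvC s p - pvC s p * ((256 * g) % 1000000007)) % 1000000007 := by
    conv_lhs => rw [Int.sub_emod, Int.mul_emod (pvC s p) (256 * g)]
    conv_rhs => rw [Int.sub_emod, Int.mul_emod (pvC s p) ((256 * g) % 1000000007),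
      Int.emod_emod_of_dvd _ dvd_rfl]
  rw [h2, hg]
  simp

-- A's first-window fold computes the hash of window 0
theorem pv_first_fold (s : String) (K : Nat) :
    (PySem.List.pyRange 0 (K : Int) 1).foldl
      (fun h i => PySem.Int.mod (h * 256 + pvOrdAt s i) ((10:Int) ^ 9 + 7)) 0 = pvW s 0 K := by
  rw [PySem.List.pyRange_one]
  simp only [Int.sub_zero, Int.toNat_natCast, List.foldl_map, pv_mod_eq]
  have hfun : (fun (h : Int) (k_1 : Nat) => ((h * 256 + pvOrdAt s (0 + (k_1 : Int))) % 1000000007))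
      = fun h j => (h * 256 + pvC s (0 + j)) % 1000000007 := by
    funext h j
    rw [show ((0 : Int) + (j : Int)) = ((0 + j : Nat) : Int) by push_cast; ring, pvOrdAt_natCast]
  rw [hfun]
  exact pv_horner_fold s 0 K

-- B's window fold at integer offset ↑j computes the hash of window j
theorem pv_window_fold (s : String) (K j : Nat) :
    (PySem.List.pyRange 0 (K : Int) 1).foldl
      (fun h i => PySem.Int.mod (h * 256 + pvOrdAt s ((j : Int) + i)) ((10:Int) ^ 9 + 7)) 0
      = pvW s j K := by
  rw [PySem.List.pyRange_one]
  simp only [Int.sub_zero, Int.toNat_natCast, List.foldl_map, pv_mod_eq]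
  have hfun : (fun (h : Int) (k_1 : Nat) => ((h * 256 + pvOrdAt s ((j : Int) + (0 + (k_1 : Int)))) % 1000000007))
      = fun h t => (h * 256 + pvC s (j + t)) % 1000000007 := by
    funext h t
    rw [show ((j : Int) + (0 + (t : Int))) = ((j + t : Nat) : Int) by push_cast; ring, pvOrdAt_natCast]
  rw [hfun]
  exact pv_horner_fold s j K

-- A's slide loop: invariant fold over windows 1..T
theorem pv_loopA (s : String) (K : Nat) (hp : Int)
    (hstep : ∀ p : Nat,
      PySem.Int.mod (PySem.Int.mod (PySem.Int.mod (pvW s p K - pvOrdAt s (((p : Int) + 1) - 1) * hp) ((10:Int) ^ 9 + 7) * 256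
            + pvOrdAt s (((p : Int) + 1) + (K : Int) - 1)) ((10:Int) ^ 9 + 7) + ((10:Int) ^ 9 + 7)) ((10:Int) ^ 9 + 7)
        = pvW s (p + 1) K) :
    ∀ T : Nat,
    (PySem.List.pyRange 1 ((T : Int) + 1) 1).foldl
      (fun (st : Int × List Int) i =>
        (PySem.Int.mod (PySem.Int.mod (PySem.Int.mod (st.1 - pvOrdAt s (i - 1) * hp) ((10:Int) ^ 9 + 7) * 256
            + pvOrdAt s (i + (K : Int) - 1)) ((10:Int) ^ 9 + 7) + ((10:Int) ^ 9 + 7)) ((10:Int) ^ 9 + 7),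
         st.2 ++ [PySem.Int.mod (PySem.Int.mod (PySem.Int.mod (st.1 - pvOrdAt s (i - 1) * hp) ((10:Int) ^ 9 + 7) * 256
            + pvOrdAt s (i + (K : Int) - 1)) ((10:Int) ^ 9 + 7) + ((10:Int) ^ 9 + 7)) ((10:Int) ^ 9 + 7)]))
      (pvW s 0 K, [pvW s 0 K])
    = (pvW s T K, (List.range (T + 1)).map (fun j => pvW s j K)) := by
  intro T
  induction T with
  | zero =>
    rw [PySem.List.pyRange_one_eq_nil (by norm_num)]
    simp
  | succ T ih =>
    rw [show ((T + 1 : Nat) : Int) + 1 = ((T : Int) + 1) + 1 by push_cast; ring,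
      PySem.List.pyRange_one_succ_right (by omega), List.foldl_append, ih]
    simp only [List.foldl_cons, List.foldl_nil]
    rw [hstep T]
    rw [List.range_succ (n := T + 1), List.map_append]
    rfl

-- ===== VERDICT (by name: the statement is the Claim_ definition above) =====
theorem generate_rabin_karp_hashes_spec : Claim_equal_generate_rabin_karp_hashes := by
  intro s k _ hpre
  obtain ⟨K, rfl⟩ : ∃ K : Nat, k = (K : Int) := ⟨k.toNat, by
    have : (0:Int) ≤ k := hpre
    omega⟩
  unfold Spec_generate_rabin_karp_hashes generate_rabin_karp_hashes generate_rabin_karp_hashes_alt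
  by_cases hnk : PySem.Str.len s < (K : Int)
  · simp only [if_pos hnk]
  · simp only [if_neg hnk]
    have hlen : PySem.Str.len s = (s.toList.length : Int) := by simp
    set N := s.toList.length with hN
    have hKN : K ≤ N := by rw [hlen] at hnk; omega
    have hrange : PySem.Str.len s - (K : Int) + 1 = ((N - K : Nat) : Int) + 1 := by
      rw [hlen]; push_cast [hKN]; ring
    rw [hrange]
    -- B side
    have hB : (PySem.List.pyRange 0 (((N - K : Nat) : Int) + 1) 1).map (fun i =>
        (PySem.List.pyRange 0 (K : Int) 1).foldl
          (fun h j => PySem.Int.mod (h * 256 + pvOrdAt s (i + j)) ((10:Int) ^ 9 + 7)) 0)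
        = (List.range (N - K + 1)).map (fun j => pvW s j K) := by
      conv_lhs => rw [PySem.List.pyRange_one 0 (((N - K : Nat) : Int) + 1)]
      simp only [Int.sub_zero, List.map_map]
      rw [show (((N - K : Nat) : Int) + 1).toNat = N - K + 1 by omega]
      refine List.map_congr_left ?_
      intro t _
      show (PySem.List.pyRange 0 (K : Int) 1).foldl
          (fun h j => PySem.Int.mod (h * 256 + pvOrdAt s (0 + (t : Int) + j)) ((10:Int) ^ 9 + 7)) 0 = pvW s t K
      rw [show (0 : Int) + (t : Int) = (t : Int) by ring]
      exact pv_window_fold s K t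
    rw [hB]
    -- A side: case split on k ≥ 1 (as in the port's highest_power)
    by_cases hK1 : 1 ≤ (K : Int)
    · simp only [if_pos hK1, PySem.Int.powMod]
      have hp_eq : PySem.Int.mod ((256:Int) ^ ((K : Int) - 1).toNat) ((10:Int) ^ 9 + 7)
          = 256 ^ (K - 1) % 1000000007 := by
        rw [pv_mod_eq, show ((K : Int) - 1).toNat = K - 1 by omega]
      rw [pv_first_fold, hp_eq]
      have := pv_loopA s K (256 ^ (K - 1) % 1000000007) (fun p => by
        rw [show ((p : Int) + 1) - 1 = (p : Int) by ring, pvOrdAt_natCast,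
          show ((p : Int) + 1) + (K : Int) - 1 = ((p + K : Nat) : Int) by push_cast; ring,
          pvOrdAt_natCast]
        simp only [pv_mod_eq]
        exact pv_roll_step s p K (by omega)) (N - K)
      exact congrArg Prod.snd this
    · have hK0 : K = 0 := by omega
      subst hK0
      simp only [if_neg hK1]
      rw [pv_first_fold]
      have := pv_loopA s 0 ((Nat.gcdA 256 1000000007) % 1000000007) (fun p => by
        rw [show ((p : Int) + 1) - 1 = (p : Int) by ring, pvOrdAt_natCast,
          show ((p : Int) + 1) + ((0 : Nat) : Int) - 1 = ((p : Nat) : Int) by push_cast; ring,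
          pvOrdAt_natCast]
        simp only [pv_mod_eq]
        have h0 : pvW s p 0 = 0 := by simp [pvW, pvS]
        have h0' : pvW s (p + 1) 0 = 0 := by simp [pvW, pvS]
        rw [h0, h0']
        exact pv_roll_step_zero s p) (N - 0)
      exact congrArg Prod.snd this
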